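-- pv_equiv track=rewrite | github.com/UCLA-Security-and-Privacy-Lab/Cosmic | WebformExtraction/webarena/browser_env/envs.py | filter_span_xpaths
-- ===== SOURCE A (Python) =====
-- def filter_span_xpaths(dialog_xpaths, close_xpaths, span_xpaths):
--     # Filter close XPaths to ensure they are subpaths of dialog XPaths
--     filtered_close_xpaths = [
--         close_xpath for close_xpath in close_xpaths
--         if any(close_xpath.startswith(dialog_xpath + '/') for dialog_xpath in dialog_xpaths)
--     ]
--
--     # Filter span XPaths to ensure they are subpaths of the filtered close XPaths
--     filtered_span_xpaths = [
--         span_xpath for span_xpath in span_xpaths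
--         if any(span_xpath.startswith(close_xpath + '/') for close_xpath in filtered_close_xpaths)
--     ]
--
--     return filtered_span_xpaths
-- ===== SOURCE B (Python) =====
-- def filter_span_xpaths(dialog_xpaths, close_xpaths, span_xpaths):
--     # One pass per candidate: check each '/'-ending prefix against a set of
--     # patterns, instead of scanning all patterns with startswith.
--     def _keep(candidates, patterns):
--         pset = set(patterns)
--         kept = []
--         for s in candidates:
--             for i, c in enumerate(s):
--                 if c == '/' and s[:i] in pset:
--                     kept.append(s)
--                     break
--         return kept
--     return _keep(span_xpaths, _keep(close_xpaths, dialog_xpaths))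
-- ===== Notes on version B (the rewrite author's own statement) =====
-- stated objective: faster
-- what changed: Instead of testing every candidate against every pattern with startswith, B puts the patterns in a set once and, for each candidate, walks its characters testing each '/'-terminated proper prefix for set membership, so the inner scan over the pattern list disappears.
import Mathlib
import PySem

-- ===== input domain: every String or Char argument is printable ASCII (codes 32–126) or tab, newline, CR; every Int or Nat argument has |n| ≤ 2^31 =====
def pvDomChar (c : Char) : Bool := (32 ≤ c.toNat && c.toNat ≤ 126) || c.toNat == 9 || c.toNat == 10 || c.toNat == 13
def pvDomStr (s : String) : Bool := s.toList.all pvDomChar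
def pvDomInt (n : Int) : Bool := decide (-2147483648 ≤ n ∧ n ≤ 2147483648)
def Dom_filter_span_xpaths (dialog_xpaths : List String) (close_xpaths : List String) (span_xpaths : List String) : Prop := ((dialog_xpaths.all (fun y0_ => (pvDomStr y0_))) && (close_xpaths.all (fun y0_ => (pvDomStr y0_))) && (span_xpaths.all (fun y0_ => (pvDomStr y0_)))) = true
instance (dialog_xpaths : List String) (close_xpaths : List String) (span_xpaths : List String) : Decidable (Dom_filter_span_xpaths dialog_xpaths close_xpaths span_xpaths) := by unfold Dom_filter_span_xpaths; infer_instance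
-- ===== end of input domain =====

-- B replaces the candidate×pattern startswith scan by a per-candidate walk over its
-- '/'-terminated prefixes against a set of the patterns (objective: alternative).

-- ===== PORT A =====
def filter_span_xpaths (dialog_xpaths : List String) (close_xpaths : List String) (span_xpaths : List String) : List String :=
  let filtered_close_xpaths := close_xpaths.filter (fun close_xpath =>
    dialog_xpaths.any (fun dialog_xpath => PySem.Str.startswith close_xpath (dialog_xpath ++ "/")))
  span_xpaths.filter (fun span_xpath =>
    filtered_close_xpaths.any (fun close_xpath => PySem.Str.startswith span_xpath (close_xpath ++ "/")))

-- ===== PORT B =====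
-- _keep from Source B; the for/break that appends s on the first hit is the filter by 'any'.
-- s[:i] with the nonnegative i from enumerate is PySem.Str.slice s none (some i) (exact).
def pvKeep (candidates : List String) (patterns : List String) : List String :=
  let pset : PySem.Set String := PySem.Set.ofList patterns
  candidates.filter (fun s =>
    (PySem.List.enumerate s.toList 0).any (fun ic =>
      ic.2 == '/' && PySem.Set.contains pset (PySem.Str.slice s none (some ic.1))))

def filter_span_xpaths_alt (dialog_xpaths : List String) (close_xpaths : List String) (span_xpaths : List String) : List String :=
  pvKeep span_xpaths (pvKeep close_xpaths dialog_xpaths)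

-- ===== PRECONDITION & SPEC =====
def Spec_filter_span_xpaths (dialog_xpaths : List String) (close_xpaths : List String) (span_xpaths : List String) (out : List String) : Prop := out = filter_span_xpaths_alt dialog_xpaths close_xpaths span_xpaths
instance (dialog_xpaths : List String) (close_xpaths : List String) (span_xpaths : List String) (out : List String) : Decidable (Spec_filter_span_xpaths dialog_xpaths close_xpaths span_xpaths out) := by unfold Spec_filter_span_xpaths; infer_instance

-- ===== CLAIM (what is proved, stated in full; the proofs are below) =====
def Claim_equal_filter_span_xpaths : Prop := ∀ (dialog_xpaths : List String) (close_xpaths : List String) (span_xpaths : List String), Dom_filter_span_xpaths dialog_xpaths close_xpaths span_xpaths → Spec_filter_span_xpaths dialog_xpaths close_xpaths span_xpaths (filter_span_xpaths dialog_xpaths close_xpaths span_xpaths)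

-- ===== LEMMAS AND PROOFS =====

-- t ++ "/" is a prefix of u iff some '/'-position k of u has u.take k = t
lemma prefix_slash_iff (t u : List Char) :
    t ++ ['/'] <+: u ↔ ∃ k : Nat, ∃ h : k < u.length, u[k] = '/' ∧ u.take k = t := by
  constructor
  · rintro ⟨r, hr⟩
    have hu : u = t ++ '/' :: r := by simpa using hr.symm
    subst hu
    refine ⟨t.length, by simp, ?_, by simp⟩
    simp
  · rintro ⟨k, h, hc, ht⟩
    have : u.take (k + 1) = t ++ ['/'] := by
      rw [List.take_add_one, ht]
      simp [List.getElem?_eq_getElem h, hc]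
    exact this ▸ List.take_prefix _ _

-- the two keep-predicates agree on every candidate
lemma any_startswith_eq (s : String) (patterns : List String) :
    (patterns.any (fun p => PySem.Str.startswith s (p ++ "/")))
      = ((PySem.List.enumerate s.toList 0).any (fun ic =>
          ic.2 == '/' && PySem.Set.contains (PySem.Set.ofList patterns)
            (PySem.Str.slice s none (some ic.1)))) := by
  rcases Bool.eq_false_or_eq_true ((PySem.List.enumerate s.toList 0).any (fun ic =>
      ic.2 == '/' && PySem.Set.contains (PySem.Set.ofList patterns)
        (PySem.Str.slice s none (some ic.1)))) with hB | hB <;> rw [hB]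
  · -- RHS true -> LHS true
    rw [List.any_eq_true] at hB ⊢
    obtain ⟨ic, hmem, hcond⟩ := hB
    obtain ⟨k, h, rfl⟩ := (PySem.List.mem_enumerate_iff _ _ _).mp hmem
    simp only [Bool.and_eq_true, beq_iff_eq] at hcond
    obtain ⟨hc, hin⟩ := hcond
    rw [PySem.Set.contains_iff, PySem.Set.mem_ofList] at hin
    refine ⟨_, hin, ?_⟩
    rw [PySem.Str.startswith_eq]
    apply (PySem.Chars.startswith_iff _ _).mpr
    have ht : s.toList.take k = (PySem.Str.slice s none (some ((0 : Int) + k))).toList := by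
      rw [PySem.Str.toList_slice]
      simp [PySem.List.slice_to_natCast]
    have hfin : (PySem.Str.slice s none (some ((0 : Int) + k))).toList ++ ['/'] <+: s.toList := by
      rw [← ht]
      exact (prefix_slash_iff _ _).mpr ⟨k, h, hc, rfl⟩
    simpa using hfin
  · -- RHS false -> LHS false
    rw [Bool.eq_false_iff]
    intro hA
    apply Bool.eq_false_iff.mp hB
    rw [List.any_eq_true] at hA ⊢
    obtain ⟨p, hp, hsw⟩ := hA
    have hpre : p.toList ++ ['/'] <+: s.toList := by
      have := (PySem.Chars.startswith_iff (s := s.toList) (p := (p ++ "/").toList)).mp (by simpa using hsw)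
      simpa using this
    obtain ⟨k, h, hc, ht⟩ := (prefix_slash_iff _ _).mp hpre
    refine ⟨((0 : Int) + k, s.toList[k]), ?_, ?_⟩
    · exact (PySem.List.mem_enumerate_iff _ _ _).mpr ⟨k, h, rfl⟩
    · simp only [hc, Bool.and_eq_true, beq_iff_eq]
      refine ⟨trivial, ?_⟩
      rw [PySem.Set.contains_iff]
      rw [PySem.Set.mem_ofList]
      have heq : PySem.Str.slice s none (some ((0 : Int) + k)) = p := by
        apply String.toList_inj.mp
        rw [PySem.Str.toList_slice]
        simpa [PySem.List.slice_to_natCast] using ht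
      rw [heq]; exact hp

lemma pvKeep_eq (candidates patterns : List String) :
    pvKeep candidates patterns
      = candidates.filter (fun c => patterns.any (fun p => PySem.Str.startswith c (p ++ "/"))) := by
  unfold pvKeep
  apply List.filter_congr
  intro c _
  exact (any_startswith_eq c patterns).symm

-- ===== VERDICT (by name: the statement is the Claim_ definition above) =====
theorem filter_span_xpaths_spec : Claim_equal_filter_span_xpaths := by
  intro d c s _
  unfold Spec_filter_span_xpaths filter_span_xpaths filter_span_xpaths_alt
  rw [pvKeep_eq, pvKeep_eq]
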